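-- pv_equiv track=rewrite | github.com/dev-dain/algorithm-study | source/soohyun/week9/A77486.py | solution
-- ===== SOURCE A (Python) =====
-- def solution(enroll, referral, seller, amount):
--     graph, answer = {'-': ''}, {'-': 0} # 조직 관계, 판매원별 이익
--     result = []
--
--     # 조직 관계 구하기, 판매월별 이익 초기화
--     for e, r in zip(enroll, referral):
--         graph[e] = r
--         answer[e] = 0
--
--     # 판매 기록에 따른 판매원별 이익 구하기
--     for i, s in enumerate(seller):
--         person = s # 현재 판매원
--         money = amount[i] * 100 # 현재 판매원의 이익
--
--         while person != '':
--             give = int(money * 0.1) # 분배할 이익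
--
--             if give < 1: # 분배할 이익이 1원 미만일 경우 이익 분배를 종료한다
--                 answer[person] += money
--                 break
--             else:
--                 if person == '-': # 현재 판매원이 center인 경우 이익을 분배할 대상이 없으므로 모든 이익을 가진다
--                     answer[person] += money
--                 else: # 그렇지 않은 경우 남은 이익을 가진다
--                     answer[person] += money - give
--
--             money = give
--             person = graph[person]
--
--     # enroll에 따른 판매원별 이익 구하기
--     for e in enroll:
--         result.append(answer[e])
--
--     return result
-- ===== SOURCE B (Python) =====
-- def solution(enroll, referral, seller, amount):
--     parent = {'-': ''}
--     parent.update(zip(enroll, referral))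
--     answer = {e: 0 for e in enroll}
--     answer['-'] = 0
--     for s, a in zip(seller, amount):
--         # phase 1: per-level (money, give) pairs by pure arithmetic, no chart
--         pairs = []
--         money = a * 100
--         give = int(money * 0.1)
--         while give >= 1:
--             pairs.append((money, give))
--             money, give = give, int(give * 0.1)
--         # phase 2: walk the referral chain, paying one precomputed level per step
--         p = s
--         for m, g in pairs:
--             if p == '':
--                 break
--             answer[p] += m if p == '-' else m - g
--             p = parent[p]
--         else:
--             if p != '':
--                 answer[p] += money  # the terminal amount, whose give is < 1
--     return [answer[e] for e in enroll]
-- ===== Notes on version B (the rewrite author's own statement) =====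
-- stated objective: alternative
-- what changed: A interleaves the graph walk with the profit arithmetic in one while loop per sale; B splits each sale into two independent phases - first a pure-arithmetic list of (money, give) levels with its terminal remainder, then a structural walk over that list along the referral chain - and replaces the init/output loops with dict.update(zip)/comprehensions.
-- outside the precondition, e.g. on solution(['a', 'b'], ['-', 'z'], ['a'], [1]): A returns [90, 0], B returns [90, 0]; on solution(['a', 'a'], ['-'], [], []): A returns [0, 0], B returns [0, 0]
import Mathlib
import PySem

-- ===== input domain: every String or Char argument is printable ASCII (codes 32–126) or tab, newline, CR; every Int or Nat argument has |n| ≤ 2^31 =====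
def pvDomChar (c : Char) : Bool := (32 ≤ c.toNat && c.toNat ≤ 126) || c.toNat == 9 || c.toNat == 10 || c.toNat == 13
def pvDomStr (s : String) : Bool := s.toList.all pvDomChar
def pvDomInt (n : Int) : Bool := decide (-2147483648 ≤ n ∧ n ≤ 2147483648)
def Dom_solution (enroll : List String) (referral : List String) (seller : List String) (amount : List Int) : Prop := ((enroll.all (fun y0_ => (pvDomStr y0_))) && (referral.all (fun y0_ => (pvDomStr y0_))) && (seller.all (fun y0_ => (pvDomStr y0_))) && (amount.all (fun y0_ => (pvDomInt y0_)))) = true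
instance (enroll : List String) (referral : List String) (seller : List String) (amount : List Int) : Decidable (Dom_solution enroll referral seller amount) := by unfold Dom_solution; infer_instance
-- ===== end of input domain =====

-- B splits each sale's while loop into a pure-arithmetic level list plus a structural walk over it
-- (a different decomposition, not faster); equivalence is proved on Pre_ below.

-- int(money * 0.1): for |money| ≤ 2^31 * 100 (all moneys reachable on Dom) the double rounding of
-- money * 0.1 never crosses an integer, so int(money * 0.1) is exactly truncating division by 10.
def trunc10 (m : Int) : Int := if 0 ≤ m then m / 10 else -((-m) / 10)

-- ===== PORT A =====
-- the while loop: person/money state, graph lookup interleaved with the arithmetic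
-- (give = int(money*0.1) is trunc10 money, inlined)
def loopA (graph : PySem.Dict String String) (answer : PySem.Dict String Int)
    (person : String) (money : Int) : PySem.Dict String Int :=
  if person = "" then answer
  else if trunc10 money < 1 then answer.modify person 0 (· + money)
  else
    loopA graph
      (if person = "-" then answer.modify person 0 (· + money)
       else answer.modify person 0 (· + (money - trunc10 money)))
      (graph.getD person "") (trunc10 money)
termination_by money.toNat
decreasing_by simp only [trunc10] at *; split at * <;> omega

-- for i, s in enumerate(seller): ... amount[i] ...
def salesA (graph : PySem.Dict String String) (amount : List Int) :
    PySem.Dict String Int → List String → Nat → PySem.Dict String Int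
  | answer, [], _ => answer
  | answer, s :: rest, i =>
      salesA graph amount (loopA graph answer s (PySem.List.pyGetD amount (i : Int) 0 * 100)) rest (i + 1)

def solution (enroll : List String) (referral : List String) (seller : List String) (amount : List Int) : List Int :=
  let init := (enroll.zip referral).foldl
      (fun (p : PySem.Dict String String × PySem.Dict String Int) er =>
        (p.1.insert er.1 er.2, p.2.insert er.1 0))
      ((PySem.Dict.empty.insert "-" ""), (PySem.Dict.empty.insert "-" (0 : Int)))
  let answer := salesA init.1 amount init.2 seller 0
  enroll.foldl (fun res e => res ++ [answer.getD e 0]) []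

-- ===== PORT B =====
-- phase 1: the (money, give) levels (while give >= 1) plus the terminal remainder, pure arithmetic
def levelsB (acc : List (Int × Int)) (money : Int) : List (Int × Int) × Int :=
  if 1 ≤ trunc10 money then levelsB (acc ++ [(money, trunc10 money)]) (trunc10 money)
  else (acc, money)
termination_by money.toNat
decreasing_by simp only [trunc10] at *; split at * <;> omega

-- phase 2: walk the referral chain over the precomputed levels (for … else in Source B)
def walkB (parent : PySem.Dict String String) :
    PySem.Dict String Int → String → List (Int × Int) → Int → PySem.Dict String Int
  | answer, p, [], left => if p ≠ "" then answer.modify p 0 (· + left) else answer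
  | answer, p, (m, g) :: rest, left =>
    if p = "" then answer
    else walkB parent (answer.modify p 0 (· + (if p = "-" then m else m - g))) (parent.getD p "") rest left

def solution_alt (enroll : List String) (referral : List String) (seller : List String) (amount : List Int) : List Int :=
  let parent := (PySem.Dict.empty.insert "-" "").update (enroll.zip referral)
  let answer0 := (enroll.foldl (fun d e => d.insert e (0 : Int)) PySem.Dict.empty).insert "-" (0 : Int)
  let answer := (seller.zip amount).foldl (fun ans sa =>
      walkB parent ans sa.1 (levelsB [] (sa.2 * 100)).1 (levelsB [] (sa.2 * 100)).2) answer0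
  enroll.map (fun e => answer.getD e 0)

-- ===== PRECONDITION & SPEC =====
-- Pre_ excludes exactly the inputs where the Python A raises an exception (IndexError: fewer
-- amounts than sellers; KeyError: fewer referrals than enrollees, a seller outside the enrol
-- list, or — when some sale actually distributes — a referrer outside it); the last,
-- referrer-closure condition over-approximates which chart entries a sale can reach, so a few
-- inputs on which A returns (and B returns the same value) are also excluded.
def Pre_solution (enroll : List String) (referral : List String) (seller : List String) (amount : List Int) : Prop :=
  seller.length ≤ amount.length ∧
  enroll.length ≤ referral.length ∧
  (∀ s ∈ seller, s ∈ enroll ∨ s = "-" ∨ s = "") ∧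
  ((∃ sa ∈ seller.zip amount, sa.1 ≠ "" ∧ 1 ≤ sa.2) →
    ∀ r ∈ referral, r ∈ enroll ∨ r = "-" ∨ r = "")

instance (enroll : List String) (referral : List String) (seller : List String) (amount : List Int) : Decidable (Pre_solution enroll referral seller amount) := by
  unfold Pre_solution; infer_instance

def pvWitness_solution : List String × List String × List String × List Int :=
  (["a", "b"], ["-", "a"], ["b"], [10])

def Spec_solution (enroll : List String) (referral : List String) (seller : List String) (amount : List Int) (out : List Int) : Prop := out = solution_alt enroll referral seller amount
instance (enroll : List String) (referral : List String) (seller : List String) (amount : List Int) (out : List Int) : Decidable (Spec_solution enroll referral seller amount out) := by unfold Spec_solution; infer_instance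

-- ===== CLAIM (what is proved, stated in full; the proofs are below) =====
def Claim_equal_solution : Prop := ∀ (enroll : List String) (referral : List String) (seller : List String) (amount : List Int), Dom_solution enroll referral seller amount → Pre_solution enroll referral seller amount → Spec_solution enroll referral seller amount (solution enroll referral seller amount)

-- ===== LEMMAS AND PROOFS =====

lemma trunc10_lt_one {m : Int} (h : m < 10) : trunc10 m < 1 := by
  simp only [trunc10]; split <;> omega

lemma trunc10_toNat_lt {m : Int} (h : 1 ≤ trunc10 m) : (trunc10 m).toNat < m.toNat := by
  simp only [trunc10] at *; split at h <;> omega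

-- one-step equations for the recursive definitions
lemma loopA_empty (g : PySem.Dict String String) (a : PySem.Dict String Int) (m : Int) :
    loopA g a "" m = a := by rw [loopA]; simp

lemma loopA_stop {p : String} (hp : p ≠ "") {m : Int} (h : trunc10 m < 1)
    (g : PySem.Dict String String) (a : PySem.Dict String Int) :
    loopA g a p m = a.modify p 0 (· + m) := by rw [loopA]; simp [hp, h]

lemma loopA_step {p : String} (hp : p ≠ "") {m : Int} (h : ¬ trunc10 m < 1)
    (g : PySem.Dict String String) (a : PySem.Dict String Int) :
    loopA g a p m = loopA g
      (if p = "-" then a.modify p 0 (· + m) else a.modify p 0 (· + (m - trunc10 m)))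
      (g.getD p "") (trunc10 m) := by
  conv_lhs => rw [loopA]
  simp [hp, h]

lemma levelsB_stop {m : Int} (h : ¬ 1 ≤ trunc10 m) (acc : List (Int × Int)) :
    levelsB acc m = (acc, m) := by rw [levelsB]; simp [h]

lemma levelsB_step {m : Int} (h : 1 ≤ trunc10 m) (acc : List (Int × Int)) :
    levelsB acc m = levelsB (acc ++ [(m, trunc10 m)]) (trunc10 m) := by
  conv_lhs => rw [levelsB]
  simp [h]

lemma walkB_empty_person (parent : PySem.Dict String String) (ans : PySem.Dict String Int)
    (pairs : List (Int × Int)) (left : Int) : walkB parent ans "" pairs left = ans := by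
  cases pairs with
  | nil => simp [walkB]
  | cons hd tl => cases hd; simp [walkB]

lemma levelsB_acc : ∀ (n : Nat) (money : Int), money.toNat ≤ n → ∀ acc,
    levelsB acc money = (acc ++ (levelsB [] money).1, (levelsB [] money).2) := by
  intro n
  induction n with
  | zero =>
    intro money hm acc
    have h1 : ¬ 1 ≤ trunc10 money := by
      have := trunc10_lt_one (m := money) (by omega); omega
    rw [levelsB_stop h1, levelsB_stop h1]; simp
  | succ n ih =>
    intro money hm acc
    by_cases h1 : 1 ≤ trunc10 money
    · have hlt := trunc10_toNat_lt h1
      rw [levelsB_step h1 acc, levelsB_step h1 [],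
          ih _ (by omega) (acc ++ [(money, trunc10 money)]),
          ih _ (by omega) ([] ++ [(money, trunc10 money)])]
      simp
    · rw [levelsB_stop h1, levelsB_stop h1]; simp

lemma modify_getD_congr {a₁ a₂ : PySem.Dict String Int}
    (h : ∀ k, a₁.getD k 0 = a₂.getD k 0) (p : String) (f : Int → Int) :
    ∀ k, (a₁.modify p 0 f).getD k 0 = (a₂.modify p 0 f).getD k 0 := by
  intro k
  rw [PySem.Dict.getD_modify, PySem.Dict.getD_modify, h p, h k]

-- per-sale core: A's interleaved walk equals B's walk over the precomputed levels
lemma sale_eq (graph parent : PySem.Dict String String)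
    (hg : ∀ k, graph.getD k "" = parent.getD k "") :
    ∀ (n : Nat) (money : Int), money.toNat ≤ n →
    ∀ (a₁ a₂ : PySem.Dict String Int) (person : String),
      (∀ k, a₁.getD k 0 = a₂.getD k 0) →
      ∀ k, (loopA graph a₁ person money).getD k 0
        = (walkB parent a₂ person (levelsB [] money).1 (levelsB [] money).2).getD k 0 := by
  intro n
  induction n with
  | zero =>
    intro money hm a₁ a₂ person h k
    have h1 : ¬ 1 ≤ trunc10 money := by
      have := trunc10_lt_one (m := money) (by omega); omega
    rw [levelsB_stop h1]
    by_cases hp : person = ""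
    · subst hp; rw [loopA_empty, walkB_empty_person]; exact h k
    · rw [loopA_stop hp (by omega)]
      simp only [walkB, if_pos hp]
      exact modify_getD_congr h person _ k
  | succ n ih =>
    intro money hm a₁ a₂ person h k
    by_cases h1 : 1 ≤ trunc10 money
    · have hlt := trunc10_toNat_lt h1
      rw [levelsB_step h1 [], levelsB_acc n _ (by omega) ([] ++ [(money, trunc10 money)])]
      simp only [List.nil_append, List.singleton_append]
      by_cases hp : person = ""
      · subst hp; rw [loopA_empty, walkB_empty_person]; exact h k
      · rw [loopA_step hp (by omega)]
        simp only [walkB, if_neg hp]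
        rw [hg person]
        by_cases hd : person = "-"
        · simp only [if_pos hd]
          exact ih (trunc10 money) (by omega) _ _ (parent.getD person "")
            (modify_getD_congr h person _) k
        · simp only [if_neg hd]
          exact ih (trunc10 money) (by omega) _ _ (parent.getD person "")
            (modify_getD_congr h person _) k
    · rw [levelsB_stop h1]
      by_cases hp : person = ""
      · subst hp; rw [loopA_empty, walkB_empty_person]; exact h k
      · rw [loopA_stop hp (by omega)]
        simp only [walkB, if_pos hp]
        exact modify_getD_congr h person _ k

-- the sales loop: A's enumerate/index loop equals B's fold over zip(seller, amount)
lemma sales_eq (graph parent : PySem.Dict String String)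
    (hg : ∀ k, graph.getD k "" = parent.getD k "") :
    ∀ (ss : List String) (amount : List Int) (i : Nat) (a₁ a₂ : PySem.Dict String Int),
      (∀ k, a₁.getD k 0 = a₂.getD k 0) → i + ss.length ≤ amount.length →
      ∀ k, (salesA graph amount a₁ ss i).getD k 0
        = ((ss.zip (amount.drop i)).foldl
            (fun ans sa => walkB parent ans sa.1 (levelsB [] (sa.2 * 100)).1 (levelsB [] (sa.2 * 100)).2) a₂).getD k 0 := by
  intro ss
  induction ss with
  | nil => intro amount i a₁ a₂ h _ k; simp [salesA, h k]
  | cons s rest ih =>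
    intro amount i a₁ a₂ h hlen k
    have hi : i < amount.length := by simp at hlen; omega
    rw [List.drop_eq_getElem_cons hi]
    simp only [List.zip_cons_cons, List.foldl_cons, salesA]
    have hidx : PySem.List.pyGetD amount (i : Int) 0 = amount[i] := by
      rw [PySem.List.pyGetD_natCast, List.getD_eq_getElem amount 0 hi]
    rw [hidx]
    exact ih amount (i + 1) _ _
      (sale_eq graph parent hg (amount[i] * 100).toNat (amount[i] * 100) le_rfl a₁ a₂ s h)
      (by simp at hlen ⊢; omega) k

-- every lookup (default 0) in a fold of zero-valued inserts is 0
lemma fold_insert_zero_getD {β : Type} (key : β → String) (ps : List β) :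
    ∀ (d : PySem.Dict String Int), (∀ k, d.getD k 0 = 0) →
      ∀ k, (ps.foldl (fun d p => d.insert (key p) (0 : Int)) d).getD k 0 = 0 := by
  induction ps with
  | nil => intro d hd k; exact hd k
  | cons p rest ih =>
    intro d hd k
    simp only [List.foldl_cons]
    refine ih _ (fun k' => ?_) k
    rw [PySem.Dict.getD_insert]
    split
    · rfl
    · exact hd k'

-- ===== VERDICT (by name: the statement is the Claim_ definition above) =====
theorem solution_spec : Claim_equal_solution := by
  intro enroll referral seller amount _ hpre
  obtain ⟨hsa, her, _, _⟩ := hpre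
  show solution enroll referral seller amount = solution_alt enroll referral seller amount
  simp only [solution, solution_alt]
  -- A's graph and B's parent are the same dict (update is the insert loop)
  have hg : ∀ k, ((enroll.zip referral).foldl (fun d p => d.insert p.1 p.2)
        (PySem.Dict.empty.insert "-" "")).getD k ""
      = ((PySem.Dict.empty.insert "-" "").update (enroll.zip referral)).getD k "" :=
    fun _ => rfl
  -- both zero-initialised answer dicts read 0 under every key
  have ha : ∀ k, ((enroll.zip referral).foldl (fun d p => d.insert p.1 (0 : Int))
        (PySem.Dict.empty.insert "-" 0)).getD k 0
      = ((enroll.foldl (fun d e => d.insert e (0 : Int)) PySem.Dict.empty).insert "-" (0 : Int)).getD k 0 := by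
    intro k
    rw [fold_insert_zero_getD Prod.fst (enroll.zip referral) _
          (fun k' => by rw [PySem.Dict.getD_insert]; split <;> simp)]
    rw [PySem.Dict.getD_insert]
    split
    · rfl
    · exact (fold_insert_zero_getD id enroll PySem.Dict.empty (fun _ => rfl) k).symm
  have hsales := sales_eq _ _ hg seller amount 0 _ _ ha (by omega)
  simp only [List.drop_zero] at hsales
  -- result: foldl-append is map, then pointwise equality
  rw [PySem.List.foldl_append_singleton_eq_map]
  apply List.map_congr_left
  intro e _
  have hpair : (List.foldl
        (fun (p : PySem.Dict String String × PySem.Dict String Int) er =>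
          (p.1.insert er.1 er.2, p.2.insert er.1 0))
        (PySem.Dict.empty.insert "-" "", PySem.Dict.empty.insert "-" 0) (enroll.zip referral))
      = ((enroll.zip referral).foldl (fun d p => d.insert p.1 p.2) (PySem.Dict.empty.insert "-" ""),
         (enroll.zip referral).foldl (fun d p => d.insert p.1 (0 : Int)) (PySem.Dict.empty.insert "-" 0)) :=
    PySem.List.foldl_prod_mk
      (fun (d : PySem.Dict String String) (p : String × String) => d.insert p.1 p.2)
      (fun (d : PySem.Dict String Int) (p : String × String) => d.insert p.1 (0 : Int))
      (enroll.zip referral) _ _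
  rw [hpair]
  exact hsales e
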